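-- pv_equiv track=rewrite | github.com/Awsnaser/Large-Language-Model-driven-Cyber-Physical-Systems-Cyber-Range | python cyberrange_all_in_one.py | _infer_compromised_timeline
-- ===== SOURCE A (Python) =====
-- from typing import Any, Dict, List, Optional, Tuple
--
-- def _infer_compromised_timeline(dataset_rows: List[Dict[str, Any]], asset_ids: List[str]) -> List[Dict[str, bool]]:
--     state = {aid: False for aid in asset_ids}
--     timeline: List[Dict[str, bool]] = []
--     for row in dataset_rows:
--         red_target = str(row.get("red_target") or "")
--         red_res = str(row.get("red_result") or "").upper()
--         if red_target in state and (red_res.startswith("SUCCESS") or red_res.startswith("CRITICAL")):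
--             state[red_target] = True
--
--         blue_action = str(row.get("blue_action") or "").upper()
--         blue_target = str(row.get("blue_target") or "")
--         if blue_action == "RESTORE" and blue_target in state:
--             state[blue_target] = False
--
--         timeline.append(dict(state))
--     return timeline
-- ===== SOURCE B (Python) =====
-- def _infer_compromised_timeline(dataset_rows, asset_ids):
--     ids = list(dict.fromkeys(asset_ids))
--     cols = {}
--     for aid in ids:
--         comp = False
--         col = []
--         for row in dataset_rows:
--             red_res = str(row.get("red_result") or "").upper()
--             if str(row.get("red_target") or "") == aid and (
--                 red_res.startswith("SUCCESS") or red_res.startswith("CRITICAL")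
--             ):
--                 comp = True
--             if (
--                 str(row.get("blue_action") or "").upper() == "RESTORE"
--                 and str(row.get("blue_target") or "") == aid
--             ):
--                 comp = False
--             col.append(comp)
--         cols[aid] = col
--     return [{aid: cols[aid][i] for aid in ids} for i in range(len(dataset_rows))]
-- ===== Notes on version B (the rewrite author's own statement) =====
-- stated objective: alternative
-- what changed: Replaces the row-major fold that mutates a shared dict and snapshots it per row with a column-major build: each asset's boolean trajectory is computed independently in one scan, then the columns are transposed into per-row snapshots.
import Mathlib
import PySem

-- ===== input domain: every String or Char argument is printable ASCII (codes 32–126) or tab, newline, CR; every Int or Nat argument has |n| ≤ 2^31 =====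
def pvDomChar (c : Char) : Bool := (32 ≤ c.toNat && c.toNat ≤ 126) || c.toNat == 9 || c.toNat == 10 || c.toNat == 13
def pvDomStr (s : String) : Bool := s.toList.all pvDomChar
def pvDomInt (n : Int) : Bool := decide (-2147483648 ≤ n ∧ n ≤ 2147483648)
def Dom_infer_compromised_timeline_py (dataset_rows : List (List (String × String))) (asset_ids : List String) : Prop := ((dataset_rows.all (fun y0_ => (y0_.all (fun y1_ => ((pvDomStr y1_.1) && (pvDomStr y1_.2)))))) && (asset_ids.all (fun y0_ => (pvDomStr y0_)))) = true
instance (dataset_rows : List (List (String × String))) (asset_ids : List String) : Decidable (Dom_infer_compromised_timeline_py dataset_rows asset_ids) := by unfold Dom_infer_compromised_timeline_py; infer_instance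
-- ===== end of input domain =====

-- B replaces A's row-major fold (mutate a shared dict, snapshot it per row) by a column-major
-- build: each asset's boolean trajectory is computed independently, then transposed into rows.

-- ===== PORT A =====
-- str(row.get(k) or ""): a missing key gives None -> "", a present value v gives v ("" stays "")
def pvGet (row : List (String × String)) (k : String) : String :=
  (PySem.Dict.mk row).getD k ""

def pvStepA (acc : PySem.Dict String Bool × List (List (String × Bool)))
    (row : List (String × String)) : PySem.Dict String Bool × List (List (String × Bool)) :=
  let state := acc.1
  let red_target := pvGet row "red_target"
  let red_res := PySem.Str.upper (pvGet row "red_result")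
  let state :=
    if state.contains red_target &&
        (PySem.Str.startswith red_res "SUCCESS" || PySem.Str.startswith red_res "CRITICAL")
    then state.insert red_target true else state
  let blue_action := PySem.Str.upper (pvGet row "blue_action")
  let blue_target := pvGet row "blue_target"
  let state :=
    if (blue_action == "RESTORE") && state.contains blue_target
    then state.insert blue_target false else state
  (state, acc.2 ++ [state.items])

def infer_compromised_timeline_py (dataset_rows : List (List (String × String)))
    (asset_ids : List String) : List (List (String × Bool)) :=
  let state0 : PySem.Dict String Bool :=
    asset_ids.foldl (fun d aid => d.insert aid false) PySem.Dict.empty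
  (dataset_rows.foldl pvStepA (state0, [])).2

-- ===== PORT B =====
-- one asset's inner-loop step: red applied before blue, then append
def pvStepB (aid : String) (acc : Bool × List Bool) (row : List (String × String)) :
    Bool × List Bool :=
  let red_res := PySem.Str.upper (pvGet row "red_result")
  let comp :=
    if (pvGet row "red_target" == aid) &&
        (PySem.Str.startswith red_res "SUCCESS" || PySem.Str.startswith red_res "CRITICAL")
    then true else acc.1
  let comp :=
    if (PySem.Str.upper (pvGet row "blue_action") == "RESTORE") &&
        (pvGet row "blue_target" == aid)
    then false else comp
  (comp, acc.2 ++ [comp])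

def pvCol (dataset_rows : List (List (String × String))) (aid : String) : List Bool :=
  (dataset_rows.foldl (pvStepB aid) (false, [])).2

def infer_compromised_timeline_py_alt (dataset_rows : List (List (String × String)))
    (asset_ids : List String) : List (List (String × Bool)) :=
  let ids := PySem.List.dedup asset_ids   -- list(dict.fromkeys(asset_ids))
  let cols : PySem.Dict String (List Bool) :=
    ids.foldl (fun d aid => d.insert aid (pvCol dataset_rows aid)) PySem.Dict.empty
  -- ids has no duplicates, so the row dict comprehension's items are exactly this map
  (PySem.List.pyRange 0 (dataset_rows.length : Int) 1).map (fun i =>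
    ids.map (fun aid => (aid, (cols.getD aid []).getD i.toNat false)))

-- ===== PRECONDITION & SPEC =====
def Spec_infer_compromised_timeline_py (dataset_rows : List (List (String × String))) (asset_ids : List String) (out : List (List (String × Bool))) : Prop := out = infer_compromised_timeline_py_alt dataset_rows asset_ids
instance (dataset_rows : List (List (String × String))) (asset_ids : List String) (out : List (List (String × Bool))) : Decidable (Spec_infer_compromised_timeline_py dataset_rows asset_ids out) := by unfold Spec_infer_compromised_timeline_py; infer_instance

-- ===== CLAIM (what is proved, stated in full; the proofs are below) =====
def Claim_equal_infer_compromised_timeline_py : Prop := ∀ (dataset_rows : List (List (String × String))) (asset_ids : List String), Dom_infer_compromised_timeline_py dataset_rows asset_ids → Spec_infer_compromised_timeline_py dataset_rows asset_ids (infer_compromised_timeline_py dataset_rows asset_ids)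

-- ===== LEMMAS AND PROOFS =====

-- the per-asset state transition of one row (red before blue), shared characterisation
def pvStep (row : List (String × String)) (a : String) (b : Bool) : Bool :=
  if (pvGet row "blue_target" == a) && (PySem.Str.upper (pvGet row "blue_action") == "RESTORE")
  then false
  else if (pvGet row "red_target" == a) &&
      (PySem.Str.startswith (PySem.Str.upper (pvGet row "red_result")) "SUCCESS" ||
       PySem.Str.startswith (PySem.Str.upper (pvGet row "red_result")) "CRITICAL")
  then true else b

-- per-asset trajectory starting from b
def pvTraj (a : String) (b : Bool) : List (List (String × String)) → List Bool
  | [] => []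
  | r :: rs => pvStep r a b :: pvTraj a (pvStep r a b) rs

-- A's snapshots, functionally
def pvSnap (ids : List String) (f : String → Bool) :
    List (List (String × String)) → List (List (String × Bool))
  | [] => []
  | r :: rs => ids.map (fun a => (a, pvStep r a (f a))) :: pvSnap ids (fun a => pvStep r a (f a)) rs

theorem pvStepB_eq (aid : String) (b : Bool) (acc : List Bool) (row : List (String × String)) :
    pvStepB aid (b, acc) row = (pvStep row aid b, acc ++ [pvStep row aid b]) := by
  simp only [pvStepB, pvStep, Bool.and_comm]

theorem pvCol_foldl (aid : String) (rows : List (List (String × String))) :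
    ∀ (b : Bool) (acc : List Bool),
      (rows.foldl (pvStepB aid) (b, acc)).2 = acc ++ pvTraj aid b rows := by
  induction rows with
  | nil => intro b acc; simp [pvTraj]
  | cons r rs ih =>
      intro b acc
      simp only [List.foldl_cons, pvStepB_eq, pvTraj]
      rw [ih]
      simp

theorem pvCol_eq (rows : List (List (String × String))) (aid : String) :
    pvCol rows aid = pvTraj aid false rows := by
  simp [pvCol, pvCol_foldl]

-- pointwise effect of one conditional insert on a dict whose items are ids.map (a, f a)
theorem pvPhase (state : PySem.Dict String Bool) (ids : List String) (f : String → Bool)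
    (h : state.items = ids.map (fun a => (a, f a))) (hnd : ids.Nodup)
    (k : String) (c : Bool) (cond : Bool) (v : Bool)
    (hc : cond = (c && state.contains k)) :
    (if cond then state.insert k v else state).items =
      ids.map (fun a => (a, if (k == a) && c then v else f a)) := by
  have hkeys : state.keys = ids := by
    simp only [PySem.Dict.keys, h, List.map_map]
    simp [Function.comp_def]
  cases hcv : c with
  | false =>
      rw [hc, hcv]
      simp [h]
  | true =>
      by_cases hk : k ∈ ids
      · have hcont : state.contains k = true :=
          (PySem.Dict.contains_iff_mem_keys state k).mpr (hkeys ▸ hk)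
        rw [hc, hcv, hcont]
        simp only [Bool.and_self, if_true]
        rw [PySem.Dict.items_insert, hcont, if_pos rfl, h, List.map_map]
        apply List.map_congr_left
        intro a ha
        by_cases hak : a = k
        · subst hak; simp
        · simp [hak, Ne.symm hak]
      · have hcont : state.contains k = false := by
          cases hcb : state.contains k with
          | false => rfl
          | true => exact absurd (hkeys ▸ (PySem.Dict.contains_iff_mem_keys state k).mp hcb) hk
        rw [hc, hcont]
        simp only [Bool.and_false, Bool.false_eq_true, if_false, h]
        apply List.map_congr_left
        intro a ha
        have hak : k ≠ a := fun e => hk (e ▸ ha)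
        simp [hak]

-- one A-step: the new dict is the pointwise pvStep image
theorem pvStepA_items (state : PySem.Dict String Bool) (acc : List (List (String × Bool)))
    (ids : List String) (f : String → Bool)
    (h : state.items = ids.map (fun a => (a, f a))) (hnd : ids.Nodup)
    (row : List (String × String)) :
    (pvStepA (state, acc) row).1.items = ids.map (fun a => (a, pvStep row a (f a))) := by
  have h1 := pvPhase state ids f h hnd (pvGet row "red_target")
    (PySem.Str.startswith (PySem.Str.upper (pvGet row "red_result")) "SUCCESS" ||
     PySem.Str.startswith (PySem.Str.upper (pvGet row "red_result")) "CRITICAL")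
    (state.contains (pvGet row "red_target") &&
      (PySem.Str.startswith (PySem.Str.upper (pvGet row "red_result")) "SUCCESS" ||
       PySem.Str.startswith (PySem.Str.upper (pvGet row "red_result")) "CRITICAL"))
    true (Bool.and_comm _ _)
  have h2 := pvPhase _ ids _ h1 hnd (pvGet row "blue_target")
    (PySem.Str.upper (pvGet row "blue_action") == "RESTORE") _ false rfl
  simpa only [pvStepA, pvStep] using h2

-- the whole A fold produces the snapshots of pvSnap
theorem pvFoldA (rows : List (List (String × String))) (ids : List String) (hnd : ids.Nodup) :
    ∀ (state : PySem.Dict String Bool) (acc : List (List (String × Bool))) (f : String → Bool),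
      state.items = ids.map (fun a => (a, f a)) →
      (rows.foldl pvStepA (state, acc)).2 = acc ++ pvSnap ids f rows := by
  induction rows with
  | nil => intro state acc f h; simp [pvSnap]
  | cons r rs ih =>
      intro state acc f h
      have hfst := pvStepA_items state acc ids f h hnd r
      have hsnd : pvStepA (state, acc) r =
          ((pvStepA (state, acc) r).1, acc ++ [(pvStepA (state, acc) r).1.items]) := rfl
      simp only [List.foldl_cons, pvSnap]
      rw [hsnd, hfst, ih _ _ _ hfst]
      simp

-- the initial dict: value False at every key
theorem pvInit_getD (l : List String) (d : PySem.Dict String Bool) (k : String)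
    (h : d.getD k false = false) :
    (l.foldl (fun d aid => d.insert aid false) d).getD k false = false := by
  induction l generalizing d with
  | nil => simpa using h
  | cons a l ih =>
      simp only [List.foldl_cons]
      exact ih _ (by rw [PySem.Dict.getD_insert]; split <;> simp [h])

theorem pvInit_items (asset_ids : List String) :
    (asset_ids.foldl (fun d aid => d.insert aid false) PySem.Dict.empty).items =
      (PySem.List.dedup asset_ids).map (fun a => (a, false)) := by
  set d := asset_ids.foldl (fun d aid => d.insert aid false) PySem.Dict.empty with hd
  have hkeys : d.keys = PySem.List.dedup asset_ids := by
    rw [hd, PySem.Dict.keys_foldl_insert]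
    simp only [PySem.List.dedup_eq_ofList]
    exact PySem.Set.update_empty asset_ids
  have hnd : d.keys.Nodup := hkeys ▸ PySem.List.nodup_dedup asset_ids
  rw [PySem.Dict.items_eq_map_keys d hnd false, hkeys]
  apply List.map_congr_left
  intro a _
  rw [hd, pvInit_getD _ _ _ (by simp)]

-- snapshots = transposed per-asset trajectories
theorem pvSnap_eq_traj (rows : List (List (String × String))) (ids : List String) :
    ∀ (f : String → Bool),
      pvSnap ids f rows =
        (List.range rows.length).map (fun i =>
          ids.map (fun a => (a, (pvTraj a (f a) rows).getD i false))) := by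
  induction rows with
  | nil => intro f; simp [pvSnap]
  | cons r rs ih =>
      intro f
      simp only [pvSnap, List.length_cons, List.range_succ_eq_map, List.map_cons, List.map_map]
      have hhead : ids.map (fun a => (a, pvStep r a (f a)))
          = ids.map (fun a => (a, (pvTraj a (f a) (r :: rs)).getD 0 false)) :=
        List.map_congr_left (fun a _ => by simp [pvTraj])
      have htail : pvSnap ids (fun a => pvStep r a (f a)) rs
          = (List.range rs.length).map
              ((fun i => ids.map (fun a => (a, (pvTraj a (f a) (r :: rs)).getD i false))) ∘ Nat.succ) := by
        rw [ih (fun a => pvStep r a (f a))]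
        apply List.map_congr_left
        intro i _
        simp only [Function.comp_apply]
        apply List.map_congr_left
        intro a _
        simp [pvTraj]
      exact congrArg₂ List.cons hhead htail

-- a fold of inserts at fresh distinct keys appends its items
theorem pvItems_foldl (l : List String) (g : String → List Bool) :
    ∀ (d : PySem.Dict String (List Bool)),
      (∀ a ∈ l, d.contains a = false) → l.Nodup →
      (l.foldl (fun d a => d.insert a (g a)) d).items = d.items ++ l.map (fun a => (a, g a)) := by
  induction l with
  | nil => intro d _ _; simp
  | cons a l ih =>
      intro d hfresh hnd
      rw [List.nodup_cons] at hnd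
      have ha : d.contains a = false := hfresh a (by simp)
      simp only [List.foldl_cons, List.map_cons]
      rw [ih (d.insert a (g a)) ?_ hnd.2]
      · rw [PySem.Dict.items_insert, ha]
        simp
      · intro b hb
        rw [PySem.Dict.contains_insert]
        have hba : b ≠ a := fun e => hnd.1 (e ▸ hb)
        simp [hba, hfresh b (List.mem_cons_of_mem _ hb)]

-- B's cols dict looks up to pvCol on members of ids
theorem pvCols_getD (rows : List (List (String × String))) (ids : List String)
    (hnd : ids.Nodup) (aid : String) (h : aid ∈ ids) :
    ((ids.foldl (fun d a => d.insert a (pvCol rows a)) PySem.Dict.empty).getD aid []) =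
      pvCol rows aid := by
  set d := ids.foldl (fun d a => d.insert a (pvCol rows a)) PySem.Dict.empty with hd
  have hitems : d.items = ids.map (fun a => (a, pvCol rows a)) := by
    rw [hd, pvItems_foldl ids (fun a => pvCol rows a) PySem.Dict.empty (fun a _ => by simp) hnd]
    rfl
  have hk : d.keys.Nodup := by
    simp only [PySem.Dict.keys, hitems, List.map_map]
    simpa [Function.comp_def] using hnd
  have hmem : (aid, pvCol rows aid) ∈ d.items := by
    rw [hitems]; exact List.mem_map_of_mem h
  exact PySem.Dict.getD_of_mem_items d hmem hk []

-- ===== VERDICT (by name: the statement is the Claim_ definition above) =====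
theorem infer_compromised_timeline_py_spec : Claim_equal_infer_compromised_timeline_py := by
  intro rows asset_ids _
  unfold Spec_infer_compromised_timeline_py
  simp only [infer_compromised_timeline_py, infer_compromised_timeline_py_alt]
  have hnd := PySem.List.nodup_dedup asset_ids
  rw [pvFoldA rows (PySem.List.dedup asset_ids) hnd _ [] (fun _ => false) (pvInit_items asset_ids)]
  rw [List.nil_append, pvSnap_eq_traj rows _ (fun _ => false)]
  rw [PySem.List.pyRange_one 0 (rows.length : Int)]
  simp only [List.map_map, Int.sub_zero, Int.toNat_natCast]
  apply List.map_congr_left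
  intro i hi
  simp only [Function.comp_apply]
  apply List.map_congr_left
  intro aid ha
  rw [pvCols_getD rows _ hnd aid ha, pvCol_eq]
  simp
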